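-- pv_equiv track=rewrite | github.com/kna163/partitions | src/partitions/parti.py | is_core
-- ===== SOURCE A (Python) =====
-- Seq = list[int]
--
-- Part = list[int]
--
-- def part_to_seq(part : Part) -> Seq:
--     cur = 0
--     ans = []
--     for n in part[::-1]:
--         ans += (n-cur) * [1] + [0]
--         cur = n
--     return ans
--
-- def is_core(part : Part, t : int) -> bool:
--     s = part_to_seq(part)
--     if len(s) < t:
--         return True
--     for i in range(len(s)-t+1):
--         if s[i] == 1 and s[i+t-1] == 0:
--             return False
--     return True
-- ===== SOURCE B (Python) =====
-- def is_core(part, t):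
--     # positions of the zeros in the boundary word, computed directly:
--     # the j-th zero sits at (number of ones so far) + j
--     zset = set()
--     cur = 0
--     ones = 0
--     for j, n in enumerate(reversed(part)):
--         d = n - cur
--         if d > 0:
--             ones += d
--         cur = n
--         zset.add(ones + j)
--     for z in zset:
--         i = z - t + 1
--         if i >= 0 and i not in zset:
--             return False
--     return True
-- ===== Notes on version B (the rewrite author's own statement) =====
-- stated objective: faster
-- what changed: B computes the position of each of the k zeros of the boundary word directly from consecutive differences of the reversed partition and checks each zero's partner position against a hash set, instead of materialising the whole 0/1 boundary word and scanning every length-t window of it.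
-- outside the precondition, e.g. on is_core([1], 0): A returns False, B returns False; on is_core([], 0): A raises IndexError, B returns True; on is_core([0, 0], 0): A raises IndexError, B returns False
import Mathlib
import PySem

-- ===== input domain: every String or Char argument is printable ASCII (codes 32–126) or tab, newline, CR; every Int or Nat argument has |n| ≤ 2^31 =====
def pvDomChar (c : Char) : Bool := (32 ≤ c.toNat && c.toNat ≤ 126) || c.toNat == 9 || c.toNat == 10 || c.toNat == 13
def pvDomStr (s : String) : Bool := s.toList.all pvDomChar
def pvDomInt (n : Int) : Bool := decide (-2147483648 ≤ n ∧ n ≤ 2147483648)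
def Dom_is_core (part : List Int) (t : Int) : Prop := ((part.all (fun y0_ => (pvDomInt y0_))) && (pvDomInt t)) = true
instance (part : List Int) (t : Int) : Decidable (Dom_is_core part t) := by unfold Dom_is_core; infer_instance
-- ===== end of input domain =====

-- B computes the k zero-positions of the boundary word directly (O(num_parts)) instead of
-- materialising the whole 0/1 word and scanning every window (A); return values proved equal for t ≥ 1.

-- ===== PORT A =====
-- part[::-1] is slice? … (-1), which never raises (step ≠ 0): .getD [] is exact here
def part_to_seq (part : List Int) : List Int :=
  (((PySem.List.slice? part none none (-1)).getD []).foldl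
    (fun (st : Int × List Int) n => (n, st.2 ++ (List.replicate (n - st.1).toNat 1 ++ [0])))
    (0, [])).2

def is_core (part : List Int) (t : Int) : Bool :=
  let s := part_to_seq part
  if (s.length : Int) < t then true
  else
    -- for-loop with early `return False` = not-any over the range
    !((PySem.List.pyRange 0 ((s.length : Int) - t + 1) 1).any (fun i =>
        (PySem.List.pyGet? s i == some 1) && (PySem.List.pyGet? s (i + t - 1) == some 0)))

-- ===== PORT B =====
def is_core_alt (part : List Int) (t : Int) : Bool :=
  let fin := part.reverse.foldl
    (fun (st : PySem.Set Int × Int × Int × Int) n =>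
      let d := n - st.2.1
      let ones' := if d > 0 then st.2.2.1 + d else st.2.2.1
      (PySem.Set.add st.1 (ones' + st.2.2.2), n, ones', st.2.2.2 + 1))
    (PySem.Set.empty, 0, 0, 0)
  let zset := fin.1
  !(zset.any (fun z => decide (0 ≤ z - t + 1) && !(zset.contains (z - t + 1))))

-- ===== PRECONDITION & SPEC =====
-- Pre_ excludes t ≤ 0: outside the natural domain of a t-core test, where A's window scan
-- raises IndexError on some inputs (e.g. ([], 0)); B's set check still returns a value there.
def Pre_is_core (part : List Int) (t : Int) : Prop := 1 ≤ t
instance (part : List Int) (t : Int) : Decidable (Pre_is_core part t) := by unfold Pre_is_core; infer_instance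
def pvWitness_is_core : List Int × Int := ([3, 2, 1], 2)

def Spec_is_core (part : List Int) (t : Int) (out : Bool) : Prop := out = is_core_alt part t
instance (part : List Int) (t : Int) (out : Bool) : Decidable (Spec_is_core part t out) := by unfold Spec_is_core; infer_instance

-- ===== CLAIM (what is proved, stated in full; the proofs are below) =====
def Claim_equal_is_core : Prop := ∀ (part : List Int) (t : Int), Dom_is_core part t → Pre_is_core part t → Spec_is_core part t (is_core part t)

-- ===== LEMMAS AND PROOFS =====

-- invariant linking A's accumulated boundary word `ans` with B's state (zset, ones, j)
def ZInv (ans : List Int) (zset : List Int) (ones j : Int) : Prop :=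
  (∀ x ∈ ans, x = 0 ∨ x = 1) ∧
  0 ≤ ones ∧ 0 ≤ j ∧ ones + j = ans.length ∧
  (∀ q : Int, q ∈ zset ↔ 0 ≤ q ∧ q < ans.length ∧ PySem.List.pyGet? ans q = some 0)

theorem ZInv_step (ans zset : List Int) (ones j cur n : Int) (h : ZInv ans zset ones j) :
    ZInv (ans ++ (List.replicate (n - cur).toNat 1 ++ [0]))
      (PySem.Set.add zset ((if n - cur > 0 then ones + (n - cur) else ones) + j))
      (if n - cur > 0 then ones + (n - cur) else ones) (j + 1) := by
  obtain ⟨h01, hones, hj, hlen, hchar⟩ := h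
  have hones' : (if n - cur > 0 then ones + (n - cur) else ones)
      = ones + ((n - cur).toNat : Int) := by split_ifs <;> omega
  rw [hones']
  generalize (n - cur).toNat = dn at *
  have hfresh : (ones + (dn : Int) + j) ∉ zset := by
    intro hmem
    have := (hchar _).mp hmem
    omega
  have hadd : PySem.Set.add zset (ones + (dn : Int) + j) = zset ++ [ones + (dn : Int) + j] := by
    simp [PySem.Set.add, hfresh]
  rw [hadd]
  have hlen' : (ans ++ (List.replicate dn 1 ++ [0])).length = ans.length + dn + 1 := by
    simp only [List.length_append, List.length_replicate, List.length_cons, List.length_nil]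
    omega
  refine ⟨?_, by omega, by omega, ?_, ?_⟩
  · intro x hx
    rcases List.mem_append.mp hx with hx | hx
    · exact h01 x hx
    · rcases List.mem_append.mp hx with hx | hx
      · right; exact (List.eq_of_mem_replicate hx)
      · left; simpa using hx
  · rw [hlen']; push_cast; omega
  · intro q
    constructor
    · intro hq
      rcases List.mem_append.mp hq with hq | hq
      · obtain ⟨h1, h2, h3⟩ := (hchar q).mp hq
        refine ⟨h1, by rw [hlen']; push_cast; omega, ?_⟩
        rw [PySem.List.pyGet?_of_nonneg _ h1] at h3 ⊢
        rw [List.getElem?_append_left (by omega : q.toNat < ans.length)]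
        exact h3
      · have hq' : q = ones + (dn : Int) + j := by simpa using hq
        subst hq'
        refine ⟨by omega, by rw [hlen']; push_cast; omega, ?_⟩
        have hpre : ones + (dn : Int) + j = ((ans ++ List.replicate dn 1).length : Int) := by
          simp; omega
        rw [hpre, show ans ++ (List.replicate dn 1 ++ [0])
              = (ans ++ List.replicate dn 1) ++ 0 :: [] by simp]
        exact PySem.List.pyGet?_append_length _ _ _
    · rintro ⟨h1, h2, h3⟩
      rw [hlen'] at h2
      rw [PySem.List.pyGet?_of_nonneg _ h1] at h3
      by_cases hc1 : q.toNat < ans.length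
      · apply List.mem_append.mpr; left
        apply (hchar q).mpr
        refine ⟨h1, by omega, ?_⟩
        rw [PySem.List.pyGet?_of_nonneg _ h1]
        rw [List.getElem?_append_left hc1] at h3
        exact h3
      · by_cases hc2 : q.toNat < ans.length + dn
        · exfalso
          rw [List.getElem?_append_right (by omega : ans.length ≤ q.toNat)] at h3
          rw [List.getElem?_append_left
            (by simp only [List.length_replicate]; omega :
              q.toNat - ans.length < (List.replicate dn (1:Int)).length)] at h3
          rw [List.getElem?_replicate] at h3
          split_ifs at h3 with hlt
          all_goals simp at h3
        · have : q.toNat = ans.length + dn := by omega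
          apply List.mem_append.mpr; right
          simp only [List.mem_singleton]
          omega

theorem final_eq (s Z : List Int) (t : Int) (ht : 1 ≤ t)
    (h01 : ∀ x ∈ s, x = 0 ∨ x = 1)
    (hchar : ∀ q : Int, q ∈ Z ↔ 0 ≤ q ∧ q < s.length ∧ PySem.List.pyGet? s q = some 0) :
    (if (s.length : Int) < t then true
     else !((PySem.List.pyRange 0 ((s.length : Int) - t + 1) 1).any (fun i =>
        (PySem.List.pyGet? s i == some 1) && (PySem.List.pyGet? s (i + t - 1) == some 0))))
    = !(Z.any (fun z => decide (0 ≤ z - t + 1) && !(Z.contains (z - t + 1)))) := by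
  split_ifs with hlt
  · have hfalse : Z.any (fun z => decide (0 ≤ z - t + 1) && !(Z.contains (z - t + 1))) = false := by
      rw [List.any_eq_false]
      intro z hz hcon
      simp only [Bool.and_eq_true, decide_eq_true_eq] at hcon
      obtain ⟨h1, h2, _⟩ := (hchar z).mp hz
      omega
    rw [hfalse]; rfl
  · congr 1
    rw [Bool.eq_iff_iff, List.any_eq_true, List.any_eq_true]
    constructor
    · rintro ⟨i, hi, hP⟩
      rw [PySem.List.mem_pyRange_one] at hi
      simp only [Bool.and_eq_true, beq_iff_eq] at hP
      obtain ⟨hP1, hP2⟩ := hP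
      refine ⟨i + t - 1, (hchar _).mpr ⟨by omega, by omega, hP2⟩, ?_⟩
      simp only [Bool.and_eq_true, decide_eq_true_eq, Bool.not_eq_true']
      refine ⟨by omega, ?_⟩
      rw [show i + t - 1 - t + 1 = i by ring]
      rw [Bool.eq_false_iff]
      intro hcon
      have hmem : i ∈ Z := List.contains_iff_mem.mp hcon
      have := ((hchar i).mp hmem).2.2
      rw [hP1] at this
      simp at this
    · rintro ⟨z, hz, hQ⟩
      obtain ⟨h1, h2, h3⟩ := (hchar z).mp hz
      simp only [Bool.and_eq_true, decide_eq_true_eq, Bool.not_eq_true'] at hQ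
      obtain ⟨hQ1, hQ2⟩ := hQ
      refine ⟨z - t + 1, ?_, ?_⟩
      · rw [PySem.List.mem_pyRange_one]; omega
      · simp only [Bool.and_eq_true, beq_iff_eq]
        constructor
        · have hnm : z - t + 1 ∉ Z := by
            intro hmem
            rw [← List.contains_iff_mem] at hmem
            rw [hmem] at hQ2; simp at hQ2
          rw [PySem.List.pyGet?_of_nonneg _ (by omega : (0:Int) ≤ z - t + 1)]
          have hlt' : (z - t + 1).toNat < s.length := by omega
          rw [List.getElem?_eq_getElem hlt']
          rcases h01 _ (List.getElem_mem hlt') with h0 | h0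
          · exfalso
            apply hnm
            apply (hchar _).mpr
            refine ⟨by omega, by omega, ?_⟩
            rw [PySem.List.pyGet?_of_nonneg _ (by omega : (0:Int) ≤ z - t + 1),
              List.getElem?_eq_getElem hlt', h0]
          · rw [h0]
        · rw [show z - t + 1 + t - 1 = z by ring]; exact h3

theorem fold_inv (l : List Int) (cur ones j : Int) (ans zset : List Int)
    (h : ZInv ans zset ones j) :
    (l.foldl (fun (st : Int × List Int) n =>
        (n, st.2 ++ (List.replicate (n - st.1).toNat 1 ++ [0]))) (cur, ans)).1
      = (l.foldl (fun (st : PySem.Set Int × Int × Int × Int) n =>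
          let d := n - st.2.1
          let ones' := if d > 0 then st.2.2.1 + d else st.2.2.1
          (PySem.Set.add st.1 (ones' + st.2.2.2), n, ones', st.2.2.2 + 1)) (zset, cur, ones, j)).2.1
    ∧ ZInv
        (l.foldl (fun (st : Int × List Int) n =>
          (n, st.2 ++ (List.replicate (n - st.1).toNat 1 ++ [0]))) (cur, ans)).2
        (l.foldl (fun (st : PySem.Set Int × Int × Int × Int) n =>
          let d := n - st.2.1
          let ones' := if d > 0 then st.2.2.1 + d else st.2.2.1
          (PySem.Set.add st.1 (ones' + st.2.2.2), n, ones', st.2.2.2 + 1)) (zset, cur, ones, j)).1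
        (l.foldl (fun (st : PySem.Set Int × Int × Int × Int) n =>
          let d := n - st.2.1
          let ones' := if d > 0 then st.2.2.1 + d else st.2.2.1
          (PySem.Set.add st.1 (ones' + st.2.2.2), n, ones', st.2.2.2 + 1)) (zset, cur, ones, j)).2.2.1
        (l.foldl (fun (st : PySem.Set Int × Int × Int × Int) n =>
          let d := n - st.2.1
          let ones' := if d > 0 then st.2.2.1 + d else st.2.2.1
          (PySem.Set.add st.1 (ones' + st.2.2.2), n, ones', st.2.2.2 + 1)) (zset, cur, ones, j)).2.2.2 := by
  induction l generalizing cur ones j ans zset with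
  | nil => exact ⟨rfl, h⟩
  | cons m l ih =>
    simp only [List.foldl_cons]
    exact ih m _ (j + 1) _ _ (ZInv_step ans zset ones j cur m h)

-- ===== VERDICT (by name: the statement is the Claim_ definition above) =====
theorem is_core_spec : Claim_equal_is_core := by
  intro part t _ ht
  unfold Spec_is_core is_core is_core_alt part_to_seq
  rw [PySem.List.slice?_none_none_neg_one]
  have h0 : ZInv [] [] 0 0 := by
    refine ⟨by simp, le_refl 0, le_refl 0, by simp, ?_⟩
    intro q; simp only [List.not_mem_nil, List.length_nil, Int.natCast_zero, false_iff, not_and]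
    intro h1 h2; omega
  have h := fold_inv part.reverse 0 0 0 [] [] h0
  simp only [Option.getD_some]
  exact final_eq _ _ t ht h.2.1 h.2.2.2.2.2
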